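-- pv_equiv track=rewrite | github.com/trueagi-io/hyperon-experimental | python/hyperon/exts/agents/mock-chitchat/stream_iterators.py | is_certanly_sentence
-- ===== SOURCE A (Python) =====
-- abbreviations = { 2: ['A.', 'B.', 'D.', 'J.', 'M.', 'P.', 'a.', 'e.', 'i.', 'p.'],
-- 3: ['Co.', 'Dr.', 'Ed.', 'Eq.', 'Ex.', 'Ft.', 'Jr.', 'Lt.', 'Mr.', 'Ms.', 'Mt.', 'No.', 'Ph.', 'Pl.', 'Rd.', 'Sr.', 'St.', 'hr.', 'vs.'],
-- 4: ['U.S.', 'A.M.', 'Adm.', 'Amb.', 'Art.', 'Ave.', 'B.A.', 'Col.', 'D.D.', 'Dir.', 'Esq.', 'Fig.', 'Gen.', 'Gov.', 'Hon.', 'Inc.', 'J.D.', 'Ltd.', 'M.A.', 'M.D.', 'Maj.', 'Mrs.', 'P.M.', 'Pvt.', 'Rep.', 'Rev.', 'Sec.', 'Sen.', 'Sgt.', 'Vol.', 'a.m.', 'e.g.', 'etc.', 'i.e.', 'min.', 'p.m.'],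
-- 5: ['Assn.', 'B.Sc.', 'Blvd.', 'Bros.', 'Capt.', 'Chap.', 'Cmdr.', 'Corp.', 'Ed.D.', 'M.Sc.', 'Ph.D.', 'Pres.', 'Prof.'],
-- 6: ['D.D.S.'],
-- }
--
-- def is_certanly_sentence(s):
--     if len(s) < 3:
--         return False
--     if s[-1] not in ['.', '!', '?']:
--         return False
--     if len(s) > 1 and s[-2].isdigit():
--         return False
--     for l in abbreviations:
--         if len(s) == l and s in abbreviations[l]:
--             return False
--         if len(s) > l and s[-l:] in abbreviations[l] and s[-l-1] == ' ':
--             return False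
--     if s.count("|") % 2 != 0:
--         return False
--     return True
-- ===== SOURCE B (Python) =====
-- ALL_ABBREVS = frozenset([
--     'A.', 'B.', 'D.', 'J.', 'M.', 'P.', 'a.', 'e.', 'i.', 'p.',
--     'Co.', 'Dr.', 'Ed.', 'Eq.', 'Ex.', 'Ft.', 'Jr.', 'Lt.', 'Mr.', 'Ms.', 'Mt.', 'No.', 'Ph.', 'Pl.', 'Rd.', 'Sr.', 'St.', 'hr.', 'vs.',
--     'U.S.', 'A.M.', 'Adm.', 'Amb.', 'Art.', 'Ave.', 'B.A.', 'Col.', 'D.D.', 'Dir.', 'Esq.', 'Fig.', 'Gen.', 'Gov.', 'Hon.', 'Inc.', 'J.D.', 'Ltd.', 'M.A.', 'M.D.', 'Maj.', 'Mrs.', 'P.M.', 'Pvt.', 'Rep.', 'Rev.', 'Sec.', 'Sen.', 'Sgt.', 'Vol.', 'a.m.', 'e.g.', 'etc.', 'i.e.', 'min.', 'p.m.',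
--     'Assn.', 'B.Sc.', 'Blvd.', 'Bros.', 'Capt.', 'Chap.', 'Cmdr.', 'Corp.', 'Ed.D.', 'M.Sc.', 'Ph.D.', 'Pres.', 'Prof.',
--     'D.D.S.',
-- ])
--
-- def is_certanly_sentence(s):
--     if len(s) < 3:
--         return False
--     if s[-1] not in '.!?':
--         return False
--     if s[-2].isdigit():
--         return False
--     if s.rsplit(' ', 1)[-1] in ALL_ABBREVS:
--         return False
--     return s.count('|') % 2 == 0
-- ===== Notes on version B (the rewrite author's own statement) =====
-- stated objective: simpler
-- what changed: The per-length loop over the abbreviation dict with slicing and a space-before check is replaced by one flat frozenset and a single membership lookup of the final space-delimited token obtained by a rightmost single split, which is equivalent because no abbreviation contains a space and every bucket's entries have exactly the bucket's length.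
import Mathlib
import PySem

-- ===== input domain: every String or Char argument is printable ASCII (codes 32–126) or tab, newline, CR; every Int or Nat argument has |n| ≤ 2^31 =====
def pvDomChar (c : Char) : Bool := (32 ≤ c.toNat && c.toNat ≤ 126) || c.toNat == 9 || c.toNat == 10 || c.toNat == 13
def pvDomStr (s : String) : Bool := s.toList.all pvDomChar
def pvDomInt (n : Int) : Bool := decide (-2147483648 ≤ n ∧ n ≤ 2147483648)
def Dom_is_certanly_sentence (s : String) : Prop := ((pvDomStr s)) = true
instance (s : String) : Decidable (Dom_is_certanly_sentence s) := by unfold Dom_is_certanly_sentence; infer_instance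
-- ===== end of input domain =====

-- B replaces A's per-length loop over the abbreviation dict (slice + space-before check) by a single
-- lookup of the final space-delimited token in one flat set; objective: simpler (same return value everywhere).

-- ===== PORT A =====
def pvAb2 : List (List Char) := (["A.", "B.", "D.", "J.", "M.", "P.", "a.", "e.", "i.", "p."]).map String.toList
def pvAb3 : List (List Char) := (["Co.", "Dr.", "Ed.", "Eq.", "Ex.", "Ft.", "Jr.", "Lt.", "Mr.", "Ms.", "Mt.", "No.", "Ph.", "Pl.", "Rd.", "Sr.", "St.", "hr.", "vs."]).map String.toList
def pvAb4 : List (List Char) := (["U.S.", "A.M.", "Adm.", "Amb.", "Art.", "Ave.", "B.A.", "Col.", "D.D.", "Dir.", "Esq.", "Fig.", "Gen.", "Gov.", "Hon.", "Inc.", "J.D.", "Ltd.", "M.A.", "M.D.", "Maj.", "Mrs.", "P.M.", "Pvt.", "Rep.", "Rev.", "Sec.", "Sen.", "Sgt.", "Vol.", "a.m.", "e.g.", "etc.", "i.e.", "min.", "p.m."]).map String.toList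
def pvAb5 : List (List Char) := (["Assn.", "B.Sc.", "Blvd.", "Bros.", "Capt.", "Chap.", "Cmdr.", "Corp.", "Ed.D.", "M.Sc.", "Ph.D.", "Pres.", "Prof."]).map String.toList
def pvAb6 : List (List Char) := (["D.D.S."]).map String.toList
def pvAbbrevPairs : List (Nat × List (List Char)) := [(2, pvAb2), (3, pvAb3), (4, pvAb4), (5, pvAb5), (6, pvAb6)]

def is_certanly_sentence (s : String) : Bool :=
  if (s.toList).length < 3 then false
  else if !(['.', '!', '?'].contains (PySem.List.pyGetD (s.toList) (-1) ' ')) then false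
  else if decide (1 < (s.toList).length) && PySem.Chars.isdigit (PySem.List.pyGetD (s.toList) (-2) ' ') then false
  else if pvAbbrevPairs.any (fun p =>
      ((s.toList).length == p.1 && p.2.contains (s.toList)) ||
      (decide (p.1 < (s.toList).length) && p.2.contains (PySem.List.slice (s.toList) (some (-(p.1 : Int))) none)
        && (PySem.List.pyGetD (s.toList) (-(p.1 : Int) - 1) ' ' == ' '))) then false
  else if PySem.Chars.count (s.toList) ['|'] % 2 != 0 then false
  else true

-- ===== PORT B =====
def pvAllAbbrevs : PySem.Set (List Char) := PySem.Set.ofList ((["A.", "B.", "D.", "J.", "M.", "P.", "a.", "e.", "i.", "p.", "Co.", "Dr.", "Ed.", "Eq.", "Ex.", "Ft.", "Jr.", "Lt.", "Mr.", "Ms.", "Mt.", "No.", "Ph.", "Pl.", "Rd.", "Sr.", "St.", "hr.", "vs.", "U.S.", "A.M.", "Adm.", "Amb.", "Art.", "Ave.", "B.A.", "Col.", "D.D.", "Dir.", "Esq.", "Fig.", "Gen.", "Gov.", "Hon.", "Inc.", "J.D.", "Ltd.", "M.A.", "M.D.", "Maj.", "Mrs.", "P.M.", "Pvt.", "Rep.",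 "Rev.", "Sec.", "Sen.", "Sgt.", "Vol.", "a.m.", "e.g.", "etc.", "i.e.", "min.", "p.m.", "Assn.", "B.Sc.", "Blvd.", "Bros.", "Capt.", "Chap.", "Cmdr.", "Corp.", "Ed.D.", "M.Sc.", "Ph.D.", "Pres.", "Prof.", "D.D.S."]).map String.toList)

-- s.rsplit(' ', 1)[-1]: the suffix of cs after its last space, ported by hand (exact for the literal one-char separator ' ')
def pvLastTok (cs : List Char) : List Char := (cs.reverse.takeWhile (fun c => c != ' ')).reverse

def is_certanly_sentence_alt (s : String) : Bool :=
  if (s.toList).length < 3 then false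
  else if !(['.', '!', '?'].contains (PySem.List.pyGetD (s.toList) (-1) ' ')) then false
  else if PySem.Chars.isdigit (PySem.List.pyGetD (s.toList) (-2) ' ') then false
  else if PySem.Set.contains pvAllAbbrevs (pvLastTok (s.toList)) then false
  else PySem.Chars.count (s.toList) ['|'] % 2 == 0

-- ===== PRECONDITION & SPEC =====
def Spec_is_certanly_sentence (s : String) (out : Bool) : Prop := out = is_certanly_sentence_alt s
instance (s : String) (out : Bool) : Decidable (Spec_is_certanly_sentence s out) := by unfold Spec_is_certanly_sentence; infer_instance

-- ===== CLAIM (what is proved, stated in full; the proofs are below) =====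
def Claim_equal_is_certanly_sentence : Prop := ∀ (s : String), Dom_is_certanly_sentence s → Spec_is_certanly_sentence s (is_certanly_sentence s)

-- ===== LEMMAS AND PROOFS =====

-- every input splits as: no space at all, or (prefix ++ ' ' ++ space-free suffix)
theorem pvDec (cs : List Char) : (' ' ∉ cs) ∨ ∃ u v, cs = u ++ ' ' :: v ∧ ' ' ∉ v := by
  induction cs with
  | nil => exact Or.inl (by simp)
  | cons c cs ih =>
    rcases ih with h | ⟨u, v, rfl, hv⟩
    · by_cases hc : c = ' '
      · exact Or.inr ⟨[], cs, by simp [hc], h⟩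
      · refine Or.inl ?_
        simp only [List.mem_cons, not_or]
        exact ⟨fun e => hc e.symm, h⟩
    · exact Or.inr ⟨c :: u, v, rfl, hv⟩

theorem pvTakeWhileAppend (p : Char → Bool) (xs ys : List Char) (y : Char)
    (h : ∀ x ∈ xs, p x = true) (hy : p y = false) :
    (xs ++ y :: ys).takeWhile p = xs := by
  induction xs with
  | nil => simp [hy]
  | cons a xs ih =>
    simp only [List.cons_append, List.takeWhile_cons, h a (by simp)]
    simp [ih (fun x hx => h x (by simp [hx]))]

theorem pvLastTok_no_space (cs : List Char) (h : ' ' ∉ cs) : pvLastTok cs = cs := by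
  unfold pvLastTok
  rw [List.takeWhile_eq_self_iff.mpr (fun x hx => by simp; exact fun e => h (e ▸ List.mem_reverse.mp hx))]
  exact List.reverse_reverse cs

theorem pvLastTok_space (u v : List Char) (hv : ' ' ∉ v) :
    pvLastTok (u ++ ' ' :: v) = v := by
  unfold pvLastTok
  rw [show (u ++ ' ' :: v).reverse = v.reverse ++ ' ' :: u.reverse by simp]
  rw [pvTakeWhileAppend _ _ _ _ (fun x hx => by simp; exact fun e => hv (e ▸ List.mem_reverse.mp hx)) (by simp)]
  exact List.reverse_reverse v

-- the "suffix after the last space" decomposition is unique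
theorem pvUniq (u v u' v' : List Char) (h : u ++ ' ' :: v = u' ++ ' ' :: v')
    (hv : ' ' ∉ v) (hv' : ' ' ∉ v') : v = v' := by
  have := congrArg pvLastTok h
  rwa [pvLastTok_space u v hv, pvLastTok_space u' v' hv'] at this

-- one bucket of A's loop body equals a lookup of the last token in that bucket
theorem pvBucket (l : Nat) (es : List (List Char)) (hl : 0 < l)
    (hlen : ∀ t ∈ es, t.length = l) (hsp : ∀ t ∈ es, ' ' ∉ t) (cs : List Char) :
    ((cs.length == l && es.contains cs) ||
     (decide (l < cs.length) && es.contains (PySem.List.slice cs (some (-(l : Int))) none)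
       && (PySem.List.pyGetD cs (-(l : Int) - 1) ' ' == ' '))) = es.contains (pvLastTok cs) := by
  have hidx : (-(l : Int) - 1) = -(((l + 1 : Nat)) : Int) := by push_cast; ring
  rcases pvDec cs with hns | ⟨u, v, rfl, hv⟩
  · rw [pvLastTok_no_space cs hns]
    by_cases hlt : l < cs.length
    · have hmem : PySem.List.pyGetD cs (-(l : Int) - 1) ' ' ∈ cs := by
        rw [hidx]
        exact PySem.List.pyGetD_mem cs ' ' (by simp [PySem.Raise.InRange]; omega)
      have hne : (PySem.List.pyGetD cs (-(l : Int) - 1) ' ' == ' ') = false := by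
        simp only [beq_eq_false_iff_ne, ne_eq]
        exact fun e => hns (e ▸ hmem)
      simp [hne]
      exact fun h => hlen cs h
    · simp [hlt]
      exact fun h => hlen cs h
  · rw [pvLastTok_space u v hv]
    have hsplen : (u ++ ' ' :: v).length = u.length + 1 + v.length := by simp; omega
    have hcsmem : (u ++ ' ' :: v) ∈ es → False := fun h => hsp _ h (by simp)
    have hf1 : ((u ++ ' ' :: v).length == l && es.contains (u ++ ' ' :: v)) = false := by
      have hc : ((u ++ ' ' :: v) ∈ es) = False := eq_false hcsmem
      simp [hc]
    rw [hf1, Bool.false_or]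
    by_cases hvmem : v ∈ es
    · have hl' : v.length = l := hlen v hvmem
      have hlt : l < (u ++ ' ' :: v).length := by rw [hsplen]; omega
      have hdrop : (u ++ ' ' :: v).drop ((u ++ ' ' :: v).length - l) = v := by
        rw [hsplen, show u.length + 1 + v.length - l = u.length + 1 by omega,
            show (u ++ ' ' :: v) = (u ++ [' ']) ++ v by simp,
            show u.length + 1 = (u ++ [' ']).length by simp, List.drop_left]
      have hch : PySem.List.pyGetD (u ++ ' ' :: v) (-(l : Int) - 1) ' ' = ' ' := by
        rw [hidx, PySem.List.pyGetD_neg_natCast (u ++ ' ' :: v) (l + 1) ' ' (by omega)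
              (by rw [hsplen]; omega)]
        have h1 : (u ++ ' ' :: v).length - (l + 1) = u.length := by rw [hsplen]; omega
        simp only [h1]
        rw [List.getElem_append_right (Nat.le_refl u.length)]
        simp
      rw [PySem.List.slice_from_neg_natCast (u ++ ' ' :: v) l hl, hdrop, hch]
      simp [hvmem]
      omega
    · have hcv : es.contains v = false := by simp [hvmem]
      rw [hcv]
      by_cases hlt : l < (u ++ ' ' :: v).length
      · rw [PySem.List.slice_from_neg_natCast (u ++ ' ' :: v) l hl]
        by_cases hw : (u ++ ' ' :: v).drop ((u ++ ' ' :: v).length - l) ∈ es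
        · -- the dropped suffix is in the bucket: then the char before it cannot be a space
          have hch : (PySem.List.pyGetD (u ++ ' ' :: v) (-(l : Int) - 1) ' ' == ' ') = false := by
            simp only [beq_eq_false_iff_ne, ne_eq]
            intro heq
            rw [hidx, PySem.List.pyGetD_neg_natCast (u ++ ' ' :: v) (l + 1) ' ' (by omega)
                  (by omega)] at heq
            set cs := u ++ ' ' :: v with hcs
            have hsplit : cs.drop (cs.length - (l + 1)) =
                ' ' :: cs.drop (cs.length - l) := by
              rw [List.drop_eq_getElem_cons (by omega), heq,
                  show cs.length - (l + 1) + 1 = cs.length - l by omega]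
            have hdec : cs = cs.take (cs.length - (l + 1)) ++ ' ' :: cs.drop (cs.length - l) := by
              conv_lhs => rw [← List.take_append_drop (cs.length - (l + 1)) cs]
              rw [hsplit]
            have hveq : v = cs.drop (cs.length - l) :=
              pvUniq u v _ _ (hcs ▸ hdec) hv (hsp _ hw)
            exact hvmem (hveq ▸ hw)
          simp [hch]
        · have hcw : es.contains ((u ++ ' ' :: v).drop ((u ++ ' ' :: v).length - l)) = false := by
            simpa using hw
          rw [hcw]
          simp
      · have hd : decide (l < (u ++ ' ' :: v).length) = false := by
          simp [List.length_append]
          omega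
        rw [hd]
        simp

set_option maxRecDepth 20000 in
theorem pvAllEq : pvAllAbbrevs = pvAb2 ++ pvAb3 ++ pvAb4 ++ pvAb5 ++ pvAb6 := by decide

theorem pvMid (cs : List Char) :
    pvAbbrevPairs.any (fun p =>
      (cs.length == p.1 && p.2.contains cs) ||
      (decide (p.1 < cs.length) && p.2.contains (PySem.List.slice cs (some (-(p.1 : Int))) none)
        && (PySem.List.pyGetD cs (-(p.1 : Int) - 1) ' ' == ' '))) =
    PySem.Set.contains pvAllAbbrevs (pvLastTok cs) := by
  have e2 := pvBucket 2 pvAb2 (by norm_num) (by decide) (by decide) cs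
  have e3 := pvBucket 3 pvAb3 (by norm_num) (by decide) (by decide) cs
  have e4 := pvBucket 4 pvAb4 (by norm_num) (by decide) (by decide) cs
  have e5 := pvBucket 5 pvAb5 (by norm_num) (by decide) (by decide) cs
  have e6 := pvBucket 6 pvAb6 (by norm_num) (by decide) (by decide) cs
  simp only [pvAbbrevPairs, List.any_cons, List.any_nil, Bool.or_false]
  rw [e2, e3, e4, e5, e6, pvAllEq, Bool.eq_iff_iff]
  show _ ↔ PySem.Set.contains _ _ = true
  rw [show ∀ (l : List (List Char)) (x : List Char), PySem.Set.contains l x = l.contains x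
        from fun _ _ => rfl]
  simp

-- ===== VERDICT (by name: the statement is the Claim_ definition above) =====
theorem is_certanly_sentence_spec : Claim_equal_is_certanly_sentence := by
  intro s _
  unfold Spec_is_certanly_sentence is_certanly_sentence is_certanly_sentence_alt
  generalize s.toList = cs
  by_cases h3 : cs.length < 3
  · simp [h3]
  · have h1 : decide (1 < cs.length) = true := by simp; omega
    rw [pvMid cs, h1]
    simp only [if_neg h3, Bool.true_and]
    split_ifs with hc1 hc2 hc3 hc4
    · rfl
    · rfl
    · rfl
    · simp only [bne_iff_ne, ne_eq] at hc4
      have h1 : PySem.Chars.count cs ['|'] % 2 = 1 := by omega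
      simp [h1]
    · simp only [bne_iff_ne, ne_eq, not_not] at hc4
      simp [hc4]
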